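-- pv_equiv track=rewrite | github.com/harikumar08/Assignment_nxt_wave | project2/problem1.py | caesar_cipher
-- ===== SOURCE A (Python) =====
-- def caesar_cipher(text, shift, encode=True):
--     if not encode:
--         shift = -shift
--     result = []
--     for c in text:
--         if c.isalpha():
--             base = ord('A') if c.isupper() else ord('a')
--             result.append(chr((ord(c) - base + shift) % 26 + base))
--         else:
--             result.append(c)
--     return ''.join(result)
-- ===== SOURCE B (Python) =====
-- def caesar_cipher(text, shift, encode=True):
--     k = (shift if encode else -shift) % 26
--     up = ''.join(chr(65 + i) for i in range(26))
--     lo = ''.join(chr(97 + i) for i in range(26))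
--     table = str.maketrans(up + lo, up[k:] + up[:k] + lo[k:] + lo[:k])
--     return text.translate(table)
-- ===== Notes on version B (the rewrite author's own statement) =====
-- stated objective: idiomatic
-- what changed: Replaces A's per-character isalpha/isupper branching loop with a 52-entry translation table built once from the (shift % 26)-rotated alphabets and applied via str.translate in one library pass.
import Mathlib
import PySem

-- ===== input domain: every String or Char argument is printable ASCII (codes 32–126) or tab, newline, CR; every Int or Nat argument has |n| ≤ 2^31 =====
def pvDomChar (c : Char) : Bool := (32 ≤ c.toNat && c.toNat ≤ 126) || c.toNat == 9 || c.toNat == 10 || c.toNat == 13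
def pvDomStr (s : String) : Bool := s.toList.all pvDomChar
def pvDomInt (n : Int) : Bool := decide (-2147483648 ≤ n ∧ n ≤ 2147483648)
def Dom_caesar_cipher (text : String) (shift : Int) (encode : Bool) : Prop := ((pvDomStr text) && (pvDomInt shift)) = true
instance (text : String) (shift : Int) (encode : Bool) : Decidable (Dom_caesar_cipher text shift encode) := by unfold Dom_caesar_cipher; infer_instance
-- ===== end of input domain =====

-- B replaces A's per-character branching loop by a 52-entry translation table built once
-- (str.maketrans/translate); equivalence on printable-ASCII input is proved below.

-- ===== PORT A =====
-- literal transliteration of A: per-character loop with append, shift applied via Python '%'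
def caesar_cipher (text : String) (shift : Int) (encode : Bool) : String :=
  let shift1 : Int := if !encode then -shift else shift
  let result : List Char := text.toList.foldl (fun acc c =>
    if PySem.Chars.isalpha c then
      let base : Int := if PySem.Chars.isupper c then 65 else 97
      acc ++ [Char.ofNat (PySem.Int.mod ((c.toNat : Int) - base + shift1) 26 + base).toNat]
    else
      acc ++ [c]) []
  String.mk result

-- ===== PORT B =====
-- the translation table of Source B: (up+lo) zipped with the k-rotated alphabets
def pvTable (k : Nat) : PySem.Dict Char Char :=
  let up : List Char := (List.range 26).map (fun i => Char.ofNat (65 + i))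
  let lo : List Char := (List.range 26).map (fun i => Char.ofNat (97 + i))
  PySem.Dict.ofList ((up ++ lo).zip ((up.drop k ++ up.take k) ++ (lo.drop k ++ lo.take k)))

def caesar_cipher_alt (text : String) (shift : Int) (encode : Bool) : String :=
  let k : Nat := (PySem.Int.mod (if encode then shift else -shift) 26).toNat
  String.mk (text.toList.map (fun c => ((pvTable k).get? c).getD c))

-- ===== PRECONDITION & SPEC =====
def Spec_caesar_cipher (text : String) (shift : Int) (encode : Bool) (out : String) : Prop := out = caesar_cipher_alt text shift encode
instance (text : String) (shift : Int) (encode : Bool) (out : String) : Decidable (Spec_caesar_cipher text shift encode out) := by unfold Spec_caesar_cipher; infer_instance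

-- ===== CLAIM (what is proved, stated in full; the proofs are below) =====
def Claim_equal_caesar_cipher : Prop := ∀ (text : String) (shift : Int) (encode : Bool), Dom_caesar_cipher text shift encode → Spec_caesar_cipher text shift encode (caesar_cipher text shift encode)

-- ===== LEMMAS AND PROOFS =====

-- A's per-character transform, factored out for the proof
def pvShiftChar (s : Int) (c : Char) : Char :=
  if PySem.Chars.isalpha c then
    let base : Int := if PySem.Chars.isupper c then 65 else 97
    Char.ofNat (PySem.Int.mod ((c.toNat : Int) - base + s) 26 + base).toNat
  else c

lemma pvFoldA (s : Int) (cs : List Char) (init : List Char) :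
    cs.foldl (fun acc c =>
      if PySem.Chars.isalpha c then
        let base : Int := if PySem.Chars.isupper c then 65 else 97
        acc ++ [Char.ofNat (PySem.Int.mod ((c.toNat : Int) - base + s) 26 + base).toNat]
      else acc ++ [c]) init = init ++ cs.map (pvShiftChar s) := by
  induction cs generalizing init with
  | nil => simp
  | cons c cs ih =>
    simp only [List.foldl_cons, List.map_cons, ih, pvShiftChar]
    split <;> simp

lemma pvModShift (x s : Int) :
    PySem.Int.mod (x + s) 26 = PySem.Int.mod (x + PySem.Int.mod s 26) 26 := by
  simp only [PySem.Int.mod_eq_emod_of_pos (by norm_num : (0:Int) < 26)]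
  omega

lemma pvModBounds (s : Int) : 0 ≤ PySem.Int.mod s 26 ∧ PySem.Int.mod s 26 < 26 := by
  simp only [PySem.Int.mod_eq_emod_of_pos (by norm_num : (0:Int) < 26)]
  omega

-- the 26 × 128 per-character key fact, checked by the kernel
set_option maxRecDepth 100000 in
set_option maxHeartbeats 2000000 in
lemma pvKey : ((List.range 26).all (fun k =>
    (List.range 128).all (fun n =>
      pvShiftChar (k : Int) (Char.ofNat n) ==
        (((pvTable k).get? (Char.ofNat n)).getD (Char.ofNat n))))) = true := by
  decide

lemma pvCharStep (s : Int) (c : Char) (hc : c.toNat < 128) :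
    pvShiftChar s c = ((pvTable (PySem.Int.mod s 26).toNat).get? c).getD c := by
  obtain ⟨h0, h26⟩ := pvModBounds s
  set k : Nat := (PySem.Int.mod s 26).toNat with hk
  have hkInt : (k : Int) = PySem.Int.mod s 26 := Int.toNat_of_nonneg h0
  have hklt : k < 26 := by omega
  have step1 : pvShiftChar s c = pvShiftChar (k : Int) c := by
    unfold pvShiftChar
    split
    · simp only [hkInt]
      rw [show (c.toNat : Int) - (if PySem.Chars.isupper c then (65:Int) else 97) + s
            = ((c.toNat : Int) - (if PySem.Chars.isupper c then (65:Int) else 97)) + s by ring,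
          pvModShift]
    · rfl
  have hkmem := List.all_eq_true.mp pvKey k (List.mem_range.mpr hklt)
  have hcmem := List.all_eq_true.mp hkmem c.toNat (List.mem_range.mpr hc)
  rw [Char.ofNat_toNat] at hcmem
  rw [step1]
  exact eq_of_beq (by simpa using hcmem)

-- ===== VERDICT (by name: the statement is the Claim_ definition above) =====
theorem caesar_cipher_spec : Claim_equal_caesar_cipher := by
  intro text shift encode hdom
  unfold Spec_caesar_cipher caesar_cipher caesar_cipher_alt
  have hchars : ∀ c ∈ text.toList, c.toNat < 128 := by
    intro c hc
    have h1 : pvDomStr text = true := by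
      unfold Dom_caesar_cipher at hdom; simp at hdom; exact hdom.1
    have := List.all_eq_true.mp h1 c hc
    unfold pvDomChar at this
    simp at this
    omega
  cases encode <;>
  · simp only [Bool.not_true, Bool.not_false, if_true]
    rw [pvFoldA]
    simp only [List.nil_append]
    congr 1
    exact List.map_congr_left (fun c hc => pvCharStep _ c (hchars c hc))
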